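-- pv_equiv track=rewrite | github.com/Shaunakde/console-client | capella_console_client/client.py | _construct_order_payload
-- ===== SOURCE A (Python) =====
-- from collections import defaultdict
--
-- def _construct_order_payload(stac_items):
--     by_collect_id = defaultdict(list)
--     for item in stac_items:
--         by_collect_id[item["collection"]].append(item["id"])
--
--     order_items = []
--     for collection, stac_ids_of_coll in by_collect_id.items():
--         order_items.extend(
--             [
--                 {"collectionId": collection, "granuleId": stac_id}
--                 for stac_id in stac_ids_of_coll
--             ]
--         )
--     return {"items": order_items}
-- ===== SOURCE B (Python) =====
-- def _construct_order_payload(stac_items):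
--     def emit(items):
--         if not items:
--             return []
--         c = items[0]["collection"]
--         group = [it for it in items if it["collection"] == c]
--         rest = [it for it in items if it["collection"] != c]
--         return [
--             {"collectionId": c, "granuleId": it["id"]} for it in group
--         ] + emit(rest)
--
--     return {"items": emit(stac_items)}
-- ===== Notes on version B (the rewrite author's own statement) =====
-- stated objective: alternative
-- what changed: Replaces the defaultdict group-then-flatten with a recursive partition: take the first item's collection, emit all its items' payload rows, and recurse on the remaining items, so no dict of id lists is ever built.
import Mathlib
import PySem

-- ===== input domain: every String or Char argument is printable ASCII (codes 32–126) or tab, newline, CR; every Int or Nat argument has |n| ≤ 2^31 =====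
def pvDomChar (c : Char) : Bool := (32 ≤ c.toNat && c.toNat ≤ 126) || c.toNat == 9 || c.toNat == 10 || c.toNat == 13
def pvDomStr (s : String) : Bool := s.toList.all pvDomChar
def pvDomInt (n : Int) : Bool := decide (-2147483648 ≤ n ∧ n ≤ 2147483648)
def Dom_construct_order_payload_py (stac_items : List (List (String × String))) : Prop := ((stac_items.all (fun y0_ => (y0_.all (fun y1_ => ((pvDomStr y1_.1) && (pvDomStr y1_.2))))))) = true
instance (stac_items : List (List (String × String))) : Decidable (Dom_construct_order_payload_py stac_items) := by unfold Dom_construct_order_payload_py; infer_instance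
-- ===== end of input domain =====

-- B replaces the defaultdict group-then-flatten with a recursive partition (take the first item's
-- collection, emit its rows, recurse on the remaining items) — alternative decomposition, no dict built.


-- item["k"]: Pre_ guarantees the key is present, so getD with a dummy default equals the raising lookup.
def pvItemGet (item : List (String × String)) (k : String) : String :=
  (PySem.Dict.mk item).getD k ""

-- ===== PORT A =====
def construct_order_payload_py (stac_items : List (List (String × String))) : List (String × List (List (String × String))) :=
  -- by_collect_id[item["collection"]].append(item["id"])  ==  modify key [] (· ++ [id]);
  -- order_items is the second foldl (extend), over by_collect_id.items
  [("items",
    (stac_items.foldl (fun d item =>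
        d.modify (pvItemGet item "collection") [] (· ++ [pvItemGet item "id"]))
      PySem.Dict.empty).items.foldl (fun acc kv =>
        acc ++ kv.2.map (fun stac_id => [("collectionId", kv.1), ("granuleId", stac_id)])) [])]

-- ===== PORT B =====
-- emit(items): partition off the first item's collection, emit its rows, recurse on the rest.
def pvEmit : List (List (String × String)) → List (List (String × String))
  | [] => []
  | it :: rest =>
    ((it :: rest).filter (fun x => pvItemGet x "collection" == pvItemGet it "collection")).map
      (fun x => [("collectionId", pvItemGet it "collection"), ("granuleId", pvItemGet x "id")]) ++
    pvEmit ((it :: rest).filter (fun x => !(pvItemGet x "collection" == pvItemGet it "collection")))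
termination_by items => items.length
decreasing_by
  simp only [List.filter_cons, beq_self_eq_true, Bool.not_true, List.length_cons]
  exact Nat.lt_succ_of_le (List.length_filter_le _ _)

def construct_order_payload_py_alt (stac_items : List (List (String × String))) : List (String × List (List (String × String))) :=
  [("items", pvEmit stac_items)]

-- ===== PRECONDITION & SPEC =====
-- Pre_ excludes exactly the items missing a "collection" or "id" key, on which Python A raises KeyError.
def Pre_construct_order_payload_py (stac_items : List (List (String × String))) : Prop :=
  ∀ item ∈ stac_items, (PySem.Dict.mk item).contains "collection" = true ∧ (PySem.Dict.mk item).contains "id" = true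
instance (stac_items : List (List (String × String))) : Decidable (Pre_construct_order_payload_py stac_items) := by
  unfold Pre_construct_order_payload_py; infer_instance

def pvWitness_construct_order_payload_py : (List (List (String × String))) :=
  [[("collection", "c1"), ("id", "g1")], [("collection", "c2"), ("id", "g2")], [("collection", "c1"), ("id", "g3")]]

def Spec_construct_order_payload_py (stac_items : List (List (String × String))) (out : List (String × List (List (String × String)))) : Prop := out = construct_order_payload_py_alt stac_items
instance (stac_items : List (List (String × String))) (out : List (String × List (List (String × String)))) : Decidable (Spec_construct_order_payload_py stac_items out) := by unfold Spec_construct_order_payload_py; infer_instance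

-- ===== CLAIM (what is proved, stated in full; the proofs are below) =====
def Claim_equal_construct_order_payload_py : Prop := ∀ (stac_items : List (List (String × String))), Dom_construct_order_payload_py stac_items → Pre_construct_order_payload_py stac_items → Spec_construct_order_payload_py stac_items (construct_order_payload_py stac_items)

-- ===== LEMMAS AND PROOFS =====

-- proof-only helpers: the common "grouped by first-seen collection" normal form
def pvKey (it : List (String × String)) : String := pvItemGet it "collection"
def pvRow (c : String) (it : List (String × String)) : List (String × String) :=
  [("collectionId", c), ("granuleId", pvItemGet it "id")]
def pvF (items : List (List (String × String))) : List (List (String × String)) :=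
  (PySem.Set.ofList (items.map pvKey)).flatMap
    (fun c => (items.filter (fun it => pvKey it == c)).map (pvRow c))

-- A dict with Nodup keys is its key list paired with its lookups.
theorem pv_items_eq_keys_map (d : PySem.Dict String (List String)) (h : d.keys.Nodup) :
    d.items = d.keys.map (fun k => (k, d.getD k [])) := by
  have : d.keys.map (fun k => (k, d.getD k [])) = d.items.map (fun p => (p.1, d.getD p.1 [])) := by
    simp [PySem.Dict.keys, List.map_map, Function.comp]
  rw [this]
  conv_lhs => rw [← List.map_id d.items]
  apply List.map_congr_left
  intro p hp
  have := PySem.Dict.getD_of_mem_items (d := d) (k := p.1) (v := p.2) (d0 := []) (by simpa using hp) h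
  simp [this]

-- A-side: A's payload is the normal form pvF.
theorem pvA_eq (stac_items : List (List (String × String))) :
    construct_order_payload_py stac_items = [("items", pvF stac_items)] := by
  unfold construct_order_payload_py pvF
  set d : PySem.Dict String (List String) :=
    stac_items.foldl (fun d item =>
      d.modify (pvItemGet item "collection") [] (· ++ [pvItemGet item "id"])) PySem.Dict.empty with hd
  have hkeys : d.keys = PySem.Set.ofList (stac_items.map pvKey) := by
    rw [hd, PySem.Dict.keys_foldl_modify_key]
    rw [PySem.Dict.keys_empty, PySem.Set.update_nil_left]
    rfl
  have hnodup : d.keys.Nodup := hkeys ▸ PySem.Set.nodup_ofList _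
  have hget : ∀ c, d.getD c [] =
      ((stac_items.map (fun it => (pvItemGet it "collection", pvItemGet it "id"))).filter (fun p => p.1 == c)).map (·.2) := by
    intro c
    rw [hd, ← List.foldl_map (f := fun it : List (String × String) => (pvItemGet it "collection", pvItemGet it "id"))
      (g := fun d : PySem.Dict String (List String) => fun p : String × String => d.modify p.1 [] (· ++ [p.2]))]
    rw [PySem.Dict.getD_foldl_modify_append]
    simp [PySem.Dict.getD_empty]
  rw [PySem.List.foldl_append_eq_flatMap, pv_items_eq_keys_map d hnodup, hkeys]
  simp only [List.nil_append, List.flatMap_map]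
  congr 2
  congr 1
  funext c
  rw [hget c, List.filter_map, List.map_map, List.map_map]
  rfl

-- folding Set.add skips elements already present
theorem pv_foldl_add_filter (l : List String) (s : PySem.Set String) (c : String) (hc : c ∈ s) :
    l.foldl PySem.Set.add s = (l.filter (fun x => !(x == c))).foldl PySem.Set.add s := by
  induction l generalizing s with
  | nil => rfl
  | cons x l ih =>
    by_cases hx : (x == c) = true
    · have hxc : x = c := eq_of_beq hx
      have : PySem.Set.add s x = s := by
        simp [PySem.Set.add, PySem.Set.contains, hxc, hc]
      simp [hx, this, ih s hc]
    · have hx' : (x == c) = false := by simpa using hx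
      simp only [List.filter_cons, hx', Bool.not_false, List.foldl_cons]
      exact ih _ (by simp [PySem.Set.add]; split <;> simp [hc])

-- an element absent from the tail can be pulled out in front of the fold
theorem pv_foldl_add_cons (l : List String) (s : PySem.Set String) (c : String)
    (h : ∀ x ∈ l, (x == c) = false) :
    l.foldl PySem.Set.add (c :: s) = c :: l.foldl PySem.Set.add s := by
  induction l generalizing s with
  | nil => rfl
  | cons x l ih =>
    have hx := h x (by simp)
    have hxc : x ≠ c := by simpa using hx
    have hcontains : PySem.Set.contains (c :: s) x = PySem.Set.contains s x := by
      simp [PySem.Set.contains, hxc]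
    have hadd : PySem.Set.add (c :: s) x = c :: PySem.Set.add s x := by
      unfold PySem.Set.add
      rw [hcontains]
      split <;> rfl
    simp only [List.foldl_cons, hadd]
    exact ih _ (fun y hy => h y (by simp [hy]))

theorem pv_ofList_cons (c : String) (l : List String) :
    PySem.Set.ofList (c :: l) = c :: PySem.Set.ofList (l.filter (fun x => !(x == c))) := by
  rw [PySem.Set.ofList_eq_foldl, PySem.Set.ofList_eq_foldl]
  simp only [List.foldl_cons]
  have h0 : PySem.Set.add ([] : PySem.Set String) c = [c] := rfl
  rw [h0, pv_foldl_add_filter l [c] c (by simp)]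
  exact pv_foldl_add_cons _ [] c (by
    intro x hx
    have := List.of_mem_filter hx
    simpa using this)

-- B-side: the recursive partition computes the normal form pvF.
theorem pvEmit_eq (items : List (List (String × String))) : pvEmit items = pvF items := by
  induction items using pvEmit.induct with
  | case1 => simp [pvEmit, pvF]
  | case2 it rest ih =>
    rw [pvEmit]
    set c := pvItemGet it "collection" with hc
    set others := (it :: rest).filter (fun x => !(pvItemGet x "collection" == c)) with hothers
    have hothers' : others = rest.filter (fun x => !(pvKey x == c)) := by
      rw [hothers]
      simp [pvKey, hc]
    rw [ih]
    unfold pvF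
    have hmapcons : (it :: rest).map pvKey = c :: rest.map pvKey := by simp [pvKey, hc]
    rw [hmapcons, pv_ofList_cons]
    have hmapfilter : (rest.map pvKey).filter (fun x => !(x == c)) = others.map pvKey := by
      rw [hothers', List.filter_map]; rfl
    rw [hmapfilter, List.flatMap_cons]
    congr 1
    apply List.flatMap_congr  -- pointwise over members of the dedup tail
    intro c' hc'
    congr 1
    have hc'mem : c' ∈ others.map pvKey := (PySem.List.mem_dedup _ _).mp hc'
    obtain ⟨x, hx, hxk⟩ := List.mem_map.mp hc'mem
    have hxf : (!(pvKey x == c)) = true :=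
      List.of_mem_filter (p := fun y => !(pvKey y == c)) (hothers' ▸ hx)
    have hcne : c' ≠ c := by rw [← hxk]; simpa using hxf
    have hhead : (pvKey it == c') = false := by
      unfold pvKey
      rw [← hc]
      exact beq_eq_false_iff_ne.mpr (Ne.symm hcne)
    symm
    rw [List.filter_cons]
    simp only [hhead, Bool.false_eq_true, if_false]
    rw [hothers', List.filter_filter]
    apply List.filter_congr
    intro y _
    by_cases h : pvKey y = c'
    · simp [h, hcne]
    · simp [h]

theorem pv_main (stac_items : List (List (String × String))) :
    construct_order_payload_py stac_items = construct_order_payload_py_alt stac_items := by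
  rw [pvA_eq, construct_order_payload_py_alt, pvEmit_eq]

-- ===== VERDICT (by name: the statement is the Claim_ definition above) =====
theorem construct_order_payload_py_spec : Claim_equal_construct_order_payload_py := by
  intro stac_items _ _
  unfold Spec_construct_order_payload_py
  exact pv_main stac_items
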